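-- pv_equiv track=rewrite | github.com/memgraph/physics-papers-recommender | public/recommender.py | form_chunk_output
-- ===== SOURCE A (Python) =====
-- from typing import Iterator, Dict, List, Tuple, Any
--
-- OUTPUT_CHUNK_SIZE = 50
--
-- def get_str_chunks(input: str, chunk_size) -> List[str]:
--     return [input[i:i + chunk_size] for i in range(0, len(input), chunk_size)]
--
-- def form_chunk_output(input1: str, input2: str, chunk_size=OUTPUT_CHUNK_SIZE) -> List[List[str]]:
--     input1_chunks = get_str_chunks(input1, chunk_size)
--     input2_chunks = get_str_chunks(input2, chunk_size)
--     formed_chunks = []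
--     for i in range(max(len(input1_chunks), len(input2_chunks))):
--         desc1_out = " " * OUTPUT_CHUNK_SIZE if i >= len(input1_chunks) else input1_chunks[i]
--         desc2_out = " " * OUTPUT_CHUNK_SIZE if i >= len(input2_chunks) else input2_chunks[i]
--         formed_chunks.append([desc1_out, desc2_out])
--
--     return formed_chunks
-- ===== SOURCE B (Python) =====
-- from itertools import zip_longest
--
-- OUTPUT_CHUNK_SIZE = 50
--
-- def form_chunk_output(input1, input2, chunk_size=OUTPUT_CHUNK_SIZE):
--     def chunks(s):
--         if chunk_size <= 0:
--             return []
--         out = []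
--         while s:
--             out.append(s[:chunk_size])
--             s = s[chunk_size:]
--         return out
--     pad = " " * OUTPUT_CHUNK_SIZE
--     return [[a, b] for a, b in zip_longest(chunks(input1), chunks(input2), fillvalue=pad)]
-- ===== Notes on version B (the rewrite author's own statement) =====
-- stated objective: idiomatic
-- what changed: B chunks each string by iterative prefix-splitting (no index arithmetic) and pairs the two chunk lists with itertools.zip_longest and a fill value, dropping A's max-length computation, explicit index loop and the two bounds checks.
import Mathlib
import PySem

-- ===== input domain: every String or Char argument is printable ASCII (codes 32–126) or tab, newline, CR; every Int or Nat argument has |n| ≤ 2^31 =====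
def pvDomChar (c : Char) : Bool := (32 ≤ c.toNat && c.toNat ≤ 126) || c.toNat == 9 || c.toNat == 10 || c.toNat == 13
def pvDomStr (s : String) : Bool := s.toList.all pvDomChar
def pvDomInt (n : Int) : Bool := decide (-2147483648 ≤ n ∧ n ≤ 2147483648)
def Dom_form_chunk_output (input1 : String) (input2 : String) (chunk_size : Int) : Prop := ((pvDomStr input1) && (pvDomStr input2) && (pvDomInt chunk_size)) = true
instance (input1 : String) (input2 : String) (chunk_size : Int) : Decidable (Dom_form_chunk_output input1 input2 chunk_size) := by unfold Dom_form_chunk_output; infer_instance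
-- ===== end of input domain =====

-- B chunks by prefix-splitting and pairs the two chunk lists zip-longest-style with a fill value, instead of A's max-length index loop with bounds checks; return values proved equal for chunk_size ≠ 0.


-- ===== PORT A =====
-- [input[i:i + chunk_size] for i in range(0, len(input), chunk_size)]
def get_str_chunks (input : String) (chunk_size : Int) : List String :=
  (PySem.List.pyRange 0 (PySem.Str.len input) chunk_size).map
    (fun i => String.ofList (PySem.List.slice input.toList (some i) (some (i + chunk_size))))

def form_chunk_output (input1 : String) (input2 : String) (chunk_size : Int) : List (List String) :=
  let input1_chunks := get_str_chunks input1 chunk_size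
  let input2_chunks := get_str_chunks input2 chunk_size
  (PySem.List.pyRange 0 (max (input1_chunks.length : Int) (input2_chunks.length : Int)) 1).foldl
    (fun formed_chunks i =>
      -- inside the loop 0 ≤ i < length whenever the chunks[i] branch is taken, so pyGetD's default is never used
      let desc1_out := if i ≥ (input1_chunks.length : Int) then String.ofList (List.replicate 50 ' ')
                       else PySem.List.pyGetD input1_chunks i ""
      let desc2_out := if i ≥ (input2_chunks.length : Int) then String.ofList (List.replicate 50 ' ')
                       else PySem.List.pyGetD input2_chunks i ""
      formed_chunks ++ [[desc1_out, desc2_out]]) []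

-- ===== PORT B =====
def padB : String := String.ofList (List.replicate 50 ' ')

-- while s: out.append(s[:K]); s = s[K:]  — fuel = initial length bounds the iteration count (K ≥ 1 consumes ≥ 1 char per step)
def chunksBgo : Nat → List Char → Nat → List String
  | 0, _, _ => []
  | fuel+1, cs, K => match cs with
    | [] => []
    | c :: rest => String.ofList ((c :: rest).take K) :: chunksBgo fuel ((c :: rest).drop K) K

-- chunks(s): [] when chunk_size <= 0, else split off prefixes of length chunk_size
def chunksB (cs : List Char) (chunk_size : Int) : List String :=
  if chunk_size ≤ 0 then [] else chunksBgo cs.length cs chunk_size.toNat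

-- zip_longest(c1, c2, fillvalue=pad), each pair as a two-element list
def zipPadB : List String → List String → List (List String)
  | [], bs => bs.map (fun b => [padB, b])
  | a :: as, [] => [a, padB] :: zipPadB as []
  | a :: as, b :: bs => [a, b] :: zipPadB as bs

def form_chunk_output_alt (input1 : String) (input2 : String) (chunk_size : Int) : List (List String) :=
  zipPadB (chunksB input1.toList chunk_size) (chunksB input2.toList chunk_size)

-- ===== PRECONDITION & SPEC =====
-- Python's range raises ValueError for step 0, so A raises exactly when chunk_size = 0; nothing else is excluded.
def Pre_form_chunk_output (input1 : String) (input2 : String) (chunk_size : Int) : Prop := chunk_size ≠ 0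
instance (input1 : String) (input2 : String) (chunk_size : Int) : Decidable (Pre_form_chunk_output input1 input2 chunk_size) := by unfold Pre_form_chunk_output; infer_instance
def pvWitness_form_chunk_output : String × String × Int := ("hello world", "ab", 3)

def Spec_form_chunk_output (input1 : String) (input2 : String) (chunk_size : Int) (out : List (List String)) : Prop := out = form_chunk_output_alt input1 input2 chunk_size
instance (input1 : String) (input2 : String) (chunk_size : Int) (out : List (List String)) : Decidable (Spec_form_chunk_output input1 input2 chunk_size out) := by unfold Spec_form_chunk_output; infer_instance

-- ===== CLAIM (what is proved, stated in full; the proofs are below) =====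
def Claim_equal_form_chunk_output : Prop := ∀ (input1 : String) (input2 : String) (chunk_size : Int), Dom_form_chunk_output input1 input2 chunk_size → Pre_form_chunk_output input1 input2 chunk_size → Spec_form_chunk_output input1 input2 chunk_size (form_chunk_output input1 input2 chunk_size)

-- ===== LEMMAS AND PROOFS =====

-- a positive-step range with b ≤ a is empty
lemma pyRange_pos_nil (a b k : Int) (hk : 0 < k) (h : b ≤ a) : PySem.List.pyRange a b k = [] := by
  rw [PySem.List.pyRange_of_pos a b hk, if_neg (by omega)]; simp

-- stepping a positive-step range by one step
lemma pyRange_pos_cons (a b k : Int) (hk : 0 < k) (hab : a < b) :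
    PySem.List.pyRange a b k = a :: PySem.List.pyRange (a + k) b k := by
  rw [PySem.List.pyRange_of_pos a b hk, PySem.List.pyRange_of_pos (a+k) b hk]
  rw [if_pos hab]
  by_cases h2 : a + k < b
  · rw [if_pos h2]
    have e1 : ((b - a + k - 1) / k).toNat = ((b - (a + k) + k - 1) / k).toNat + 1 := by
      have e : b - a + k - 1 = (b - (a+k) + k - 1) + 1 * k := by ring
      rw [e, Int.add_mul_ediv_right _ _ (by omega : k ≠ 0)]
      have hnn : 0 ≤ (b - (a+k) + k - 1) / k := Int.ediv_nonneg (by omega) (by omega)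
      omega
    rw [e1, List.range_succ_eq_map]
    simp only [List.map_cons, List.map_map, Nat.cast_zero, mul_zero, add_zero]
    congr 1
    apply List.map_congr_left
    intro j _
    simp only [Function.comp]
    push_cast; ring
  · rw [if_neg h2]
    have e0 : (b - a + k - 1) / k = 1 := by
      have a1 : 1 ≤ (b - a + k - 1) / k := by rw [Int.le_ediv_iff_mul_le hk]; omega
      have a2 : (b - a + k - 1) / k < 2 := (Int.ediv_lt_iff_lt_mul hk).mpr (by omega)
      omega
    rw [e0]
    simp

-- a positive-step range starting at its step is the shifted range starting at 0
lemma pyRange_pos_shift (b k : Int) (hk : 0 < k) :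
    PySem.List.pyRange k b k = (PySem.List.pyRange 0 (b - k) k).map (· + k) := by
  rw [PySem.List.pyRange_of_pos k b hk, PySem.List.pyRange_of_pos 0 (b-k) hk, List.map_map]
  rw [show (if 0 < b - k then ((b - k - 0 + k - 1) / k).toNat else 0)
        = (if k < b then ((b - k + k - 1) / k).toNat else 0) by
      by_cases h : k < b
      · rw [if_pos h, if_pos (by omega)]; ring_nf
      · rw [if_neg h, if_neg (by omega)]]
  apply List.map_congr_left
  intro j _
  simp only [Function.comp]
  ring

-- A's slice comprehension equals B's prefix-splitting loop, for positive chunk size and enough fuel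
lemma chunks_go (k : Int) (hk : 0 < k) : ∀ (fuel : Nat) (cs : List Char), cs.length ≤ fuel →
    (PySem.List.pyRange 0 (cs.length : Int) k).map
      (fun i => String.ofList (PySem.List.slice cs (some i) (some (i + k)))) = chunksBgo fuel cs k.toNat := by
  intro fuel
  induction fuel with
  | zero =>
      intro cs hcs
      have : cs = [] := List.length_eq_zero_iff.mp (by omega)
      subst this
      simp only [List.length_nil, Nat.cast_zero]
      rw [pyRange_pos_nil 0 0 k hk le_rfl]
      rfl
  | succ fuel ih =>
      intro cs hcs
      match cs with
      | [] =>
          simp only [List.length_nil, Nat.cast_zero]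
          rw [pyRange_pos_nil 0 0 k hk le_rfl]
          rfl
      | c :: rest =>
          have hn : 0 < ((c :: rest).length : Int) := by simp
          rw [pyRange_pos_cons 0 _ k hk hn, List.map_cons, zero_add]
          rw [chunksBgo]
          congr 1
          · congr 1
            rw [PySem.List.slice_toNat _ le_rfl (le_of_lt hk)]
            simp
          · rw [pyRange_pos_shift _ k hk, List.map_map]
            have hlen : ((c :: rest).drop k.toNat).length = (c :: rest).length - k.toNat := by simp
            have hr : PySem.List.pyRange 0 (((c :: rest).length : Int) - k) k
                = PySem.List.pyRange 0 ((((c :: rest).drop k.toNat).length : Int)) k := by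
              by_cases hK : k.toNat ≤ (c :: rest).length
              · congr 1; rw [hlen]; omega
              · rw [pyRange_pos_nil _ _ k hk (by omega), pyRange_pos_nil _ _ k hk (by rw [hlen]; omega)]
            rw [hr]
            calc ((PySem.List.pyRange 0 ((((c :: rest).drop k.toNat).length : Int)) k).map
                    ((fun i => String.ofList (PySem.List.slice (c :: rest) (some i) (some (i + k)))) ∘ (· + k)))
                = (PySem.List.pyRange 0 ((((c :: rest).drop k.toNat).length : Int)) k).map
                    (fun i => String.ofList (PySem.List.slice ((c :: rest).drop k.toNat) (some i) (some (i + k)))) := by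
                  apply List.map_congr_left
                  intro i hi
                  obtain ⟨hi0, -, -⟩ := (PySem.List.mem_pyRange_iff_of_pos hk i).mp hi
                  simp only [Function.comp]
                  congr 1
                  rw [PySem.List.slice_toNat _ (by omega) (by omega),
                      PySem.List.slice_toNat _ (by omega) (by omega),
                      List.drop_drop]
                  congr 1
                  · omega
                  · congr 1; omega
              _ = chunksBgo fuel ((c :: rest).drop k.toNat) k.toNat :=
                  ih _ (by rw [hlen]; simp only [List.length_cons] at hcs ⊢; omega)

-- A's get_str_chunks equals B's chunker for every nonzero chunk size
lemma chunks_eq (input : String) (k : Int) (hk : k ≠ 0) :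
    get_str_chunks input k = chunksB input.toList k := by
  unfold get_str_chunks chunksB
  rw [PySem.Str.len_eq]
  by_cases hneg : k ≤ 0
  · rw [if_pos hneg, PySem.List.pyRange_of_neg _ _ (by omega : k < 0), if_neg (by omega)]
    simp
  · rw [if_neg hneg]
    exact chunks_go k (by omega) _ input.toList le_rfl

-- the padded-index map over the joint range equals the zip-longest fold: left-empty case
lemma zip_aux_nil : ∀ (c2 : List String),
    (List.range c2.length).map (fun j => [padB, if c2.length ≤ j then padB else c2.getD j ""]) = zipPadB [] c2 := by
  intro c2
  induction c2 with
  | nil => simp [zipPadB]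
  | cons b bs ih =>
      rw [show zipPadB [] (b :: bs) = [padB, b] :: zipPadB [] bs from by simp [zipPadB],
          List.length_cons, List.range_succ_eq_map, List.map_cons, List.map_map]
      congr 1
      rw [← ih]
      apply List.map_congr_left
      intro j hj
      simp [Function.comp, List.getD]

-- the padded-index map over the joint range equals the zip-longest fold
lemma zip_aux : ∀ (c1 c2 : List String),
    (List.range (max c1.length c2.length)).map
      (fun j => [if c1.length ≤ j then padB else c1.getD j "",
                 if c2.length ≤ j then padB else c2.getD j ""]) = zipPadB c1 c2 := by
  intro c1
  induction c1 with
  | nil =>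
      intro c2
      rw [← zip_aux_nil c2]
      simp only [List.length_nil, Nat.zero_max]
      apply List.map_congr_left
      intro j hj
      simp
  | cons a as ih =>
      intro c2
      match c2 with
      | [] =>
          rw [zipPadB, List.length_cons, List.length_nil, Nat.max_zero, List.range_succ_eq_map,
              List.map_cons, List.map_map]
          congr 1
          rw [← ih []]
          simp only [List.length_nil, Nat.max_zero]
          apply List.map_congr_left
          intro j hj
          simp [Function.comp, List.getD]
      | b :: bs =>
          rw [zipPadB, List.length_cons, List.length_cons,
              show max (as.length+1) (bs.length+1) = max as.length bs.length + 1 from by omega,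
              List.range_succ_eq_map, List.map_cons, List.map_map]
          congr 1
          rw [← ih bs]
          apply List.map_congr_left
          intro j hj
          simp [Function.comp, List.getD]

-- A's index loop over any two chunk lists is the zip-longest fold
lemma loop_eq (c1 c2 : List String) :
    (PySem.List.pyRange 0 (max (c1.length : Int) (c2.length : Int)) 1).foldl
      (fun acc i =>
        let d1 := if i ≥ (c1.length : Int) then String.ofList (List.replicate 50 ' ') else PySem.List.pyGetD c1 i ""
        let d2 := if i ≥ (c2.length : Int) then String.ofList (List.replicate 50 ' ') else PySem.List.pyGetD c2 i ""
        acc ++ [[d1, d2]]) [] = zipPadB c1 c2 := by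
  show (PySem.List.pyRange 0 (max (c1.length : Int) (c2.length : Int)) 1).foldl
      (fun acc i => acc ++ [[if i ≥ (c1.length : Int) then padB else PySem.List.pyGetD c1 i "",
                             if i ≥ (c2.length : Int) then padB else PySem.List.pyGetD c2 i ""]]) [] = zipPadB c1 c2
  rw [PySem.List.foldl_append_singleton_eq_map
      (fun i => [if i ≥ (c1.length : Int) then padB else PySem.List.pyGetD c1 i "",
                 if i ≥ (c2.length : Int) then padB else PySem.List.pyGetD c2 i ""]),
      List.nil_append, PySem.List.pyRange_one, List.map_map]
  rw [show (max (c1.length:Int) (c2.length:Int) - 0).toNat = max c1.length c2.length from by omega]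
  rw [← zip_aux c1 c2]
  apply List.map_congr_left
  intro j hj
  simp only [Function.comp, zero_add, ge_iff_le, PySem.List.pyGetD_natCast, Nat.cast_le]

-- ===== VERDICT (by name: the statement is the Claim_ definition above) =====
theorem form_chunk_output_spec : Claim_equal_form_chunk_output := by
  intro input1 input2 k _ hk
  unfold Spec_form_chunk_output form_chunk_output form_chunk_output_alt
  rw [chunks_eq input1 k hk, chunks_eq input2 k hk]
  exact loop_eq _ _
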